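-- pv_equiv track=rewrite | github.com/Formal-Methods-Group/metta-morph | autoquote.py | extract_tokens_outside_strings
-- ===== SOURCE A (Python) =====
-- def extract_tokens_outside_strings(text):
--     """Extract tokens from text, excluding content inside string literals."""
--     tokens = []
--     current_token = []
--     in_string = False
--     escaped = False
--
--     for char in text:
--         if escaped:
--             escaped = False
--             continue
--
--         if char == '\\' and in_string:
--             escaped = True
--             continue
--
--         if char == '"':
--             if current_token and not in_string:
--                 tokens.append(''.join(current_token))
--                 current_token = []
--             in_string = not in_string
--             continue
--
--         if in_string:
--             # Skip content inside strings
--             continue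
--
--         if char in ' ()\n\t':
--             if current_token:
--                 tokens.append(''.join(current_token))
--                 current_token = []
--         else:
--             current_token.append(char)
--
--     if current_token:
--         tokens.append(''.join(current_token))
--
--     return tokens
-- ===== SOURCE B (Python) =====
-- def extract_tokens_outside_strings(text):
--     """Two passes instead of one flag machine: first erase every string literal
--     (the whole quoted span, escapes honored, becomes a single space), then split
--     the cleaned text on the delimiter set and drop empty pieces."""
--     # pass 1: erase string literals
--     cleaned = []
--     it = iter(text)
--     for c in it:
--         if c == '"':
--             cleaned.append(' ')
--             for d in it:
--                 if d == '\\':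
--                     next(it, '')
--                 elif d == '"':
--                     break
--         else:
--             cleaned.append(c)
--     # pass 2: split on delimiters, keeping empty pieces, then drop them
--     parts = []
--     word = []
--     for c in cleaned:
--         if c in ' ()\n\t':
--             parts.append(word)
--             word = []
--         else:
--             word.append(c)
--     parts.append(word)
--     return [''.join(w) for w in parts if w]
-- ===== Notes on version B (the rewrite author's own statement) =====
-- stated objective: simpler
-- what changed: Replaces A's single-pass four-state machine (tokens/current/in_string/escaped flags) by two independent passes: first erase every string literal (the quoted span, escapes honored, becomes one space), then split the cleaned text on the delimiter set and drop empty pieces.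
import Mathlib
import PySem

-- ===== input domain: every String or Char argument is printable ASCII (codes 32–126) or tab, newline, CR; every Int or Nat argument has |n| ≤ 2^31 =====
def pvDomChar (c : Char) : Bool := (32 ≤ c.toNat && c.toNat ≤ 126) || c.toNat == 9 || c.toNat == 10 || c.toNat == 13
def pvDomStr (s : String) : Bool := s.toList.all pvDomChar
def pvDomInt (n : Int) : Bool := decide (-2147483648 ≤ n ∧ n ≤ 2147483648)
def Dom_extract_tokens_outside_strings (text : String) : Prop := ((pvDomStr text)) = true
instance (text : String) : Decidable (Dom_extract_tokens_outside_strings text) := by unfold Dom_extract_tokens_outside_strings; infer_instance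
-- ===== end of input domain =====

-- B erases every string literal in a first pass (the quoted span becomes one space)
-- and then splits the cleaned text on the delimiter set; objective: simpler (no
-- in_string/escaped flag machine in the tokenizing pass).

-- the delimiter set ' ()\n\t' shared by both ports
def pvIsDelim (c : Char) : Bool := c == ' ' || c == '(' || c == ')' || c == '\n' || c == '\t'

-- ===== PORT A =====
-- state machine: tokens so far, current token, in_string, escaped
def pvGoA : List Char → List String → List Char → Bool → Bool → List String
  | [], tokens, cur, _, _ =>
      if cur ≠ [] then tokens ++ [String.mk cur] else tokens
  | c :: rest, tokens, cur, inStr, esc =>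
      if esc = true then pvGoA rest tokens cur inStr false
      else if c = '\\' ∧ inStr = true then pvGoA rest tokens cur inStr true
      else if c = '"' then
        if cur ≠ [] ∧ inStr = false then pvGoA rest (tokens ++ [String.mk cur]) [] (!inStr) esc
        else pvGoA rest tokens cur (!inStr) esc
      else if inStr = true then pvGoA rest tokens cur inStr esc
      else if pvIsDelim c then
        if cur ≠ [] then pvGoA rest (tokens ++ [String.mk cur]) [] inStr esc
        else pvGoA rest tokens cur inStr esc
      else pvGoA rest tokens (cur ++ [c]) inStr esc

def extract_tokens_outside_strings (text : String) : List String :=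
  pvGoA text.toList [] [] false false

-- ===== PORT B =====
-- pass-1 helper: consume a string literal body ('\' eats the next char, '"' closes)
def pvSkipStr : List Char → List Char
  | [] => []
  | c :: rest =>
      if c = '\\' then pvSkipStr rest.tail
      else if c = '"' then rest
      else pvSkipStr rest
termination_by l => l.length
decreasing_by
  · have h : rest.tail.length ≤ rest.length := by cases rest <;> simp
    simp only [List.length_cons]; omega
  · simp

theorem pvSkipStr_length_le_aux : ∀ n (l : List Char), l.length ≤ n → (pvSkipStr l).length ≤ l.length := by
  intro n
  induction n with
  | zero =>
      intro l hl
      have : l = [] := List.eq_nil_of_length_eq_zero (Nat.le_zero.mp hl)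
      simp [this, pvSkipStr]
  | succ n ih =>
      intro l hl
      match l with
      | [] => simp [pvSkipStr]
      | c :: rest =>
        have hrest : rest.length ≤ n := by simpa using Nat.lt_succ_iff.mp (Nat.lt_of_lt_of_le (by simp) hl)
        rw [pvSkipStr]
        by_cases hb : c = '\\'
        · rw [if_pos hb]
          have h1 : rest.tail.length ≤ rest.length := by cases rest <;> simp
          have := ih rest.tail (le_trans h1 hrest)
          simp only [List.length_cons]; omega
        · rw [if_neg hb]
          by_cases hq : c = '"'
          · rw [if_pos hq]; simp
          · rw [if_neg hq]
            have := ih rest hrest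
            simp only [List.length_cons]; omega

theorem pvSkipStr_length_le (l : List Char) : (pvSkipStr l).length ≤ l.length :=
  pvSkipStr_length_le_aux l.length l le_rfl

-- pass 1: every string literal (quotes included) becomes a single space
def pvEraseStrings : List Char → List Char
  | [] => []
  | c :: rest =>
      if c = '"' then ' ' :: pvEraseStrings (pvSkipStr rest)
      else c :: pvEraseStrings rest
termination_by l => l.length
decreasing_by
  · exact Nat.lt_succ_of_le (pvSkipStr_length_le rest)
  · simp

-- pass 2: split on delimiters, keeping empty pieces
def pvSplitGo : List Char → List (List Char) → List Char → List (List Char)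
  | [], parts, word => parts ++ [word]
  | c :: rest, parts, word =>
      if pvIsDelim c then pvSplitGo rest (parts ++ [word]) []
      else pvSplitGo rest parts (word ++ [c])

def extract_tokens_outside_strings_alt (text : String) : List String :=
  ((pvSplitGo (pvEraseStrings text.toList) [] []).filter (· ≠ [])).map String.mk

-- ===== PRECONDITION & SPEC =====
def Spec_extract_tokens_outside_strings (text : String) (out : List String) : Prop := out = extract_tokens_outside_strings_alt text
instance (text : String) (out : List String) : Decidable (Spec_extract_tokens_outside_strings text out) := by unfold Spec_extract_tokens_outside_strings; infer_instance

-- ===== CLAIM (what is proved, stated in full; the proofs are below) =====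
def Claim_equal_extract_tokens_outside_strings : Prop := ∀ (text : String), Dom_extract_tokens_outside_strings text → Spec_extract_tokens_outside_strings text (extract_tokens_outside_strings text)

-- ===== LEMMAS AND PROOFS =====

-- tokens produced by pass 2 starting with current word w over cleaned text X
def pvG (w : List Char) (X : List Char) : List String :=
  ((pvSplitGo X [] w).filter (· ≠ [])).map String.mk

theorem pvSplitGo_acc (X : List Char) (parts : List (List Char)) (w : List Char) :
    pvSplitGo X parts w = parts ++ pvSplitGo X [] w := by
  induction X generalizing parts w with
  | nil => simp [pvSplitGo]
  | cons c rest ih =>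
      by_cases h : pvIsDelim c
      · rw [pvSplitGo, if_pos h, pvSplitGo, if_pos h, ih (parts ++ [w]) [], ih ([] ++ [w]) []]
        simp
      · rw [pvSplitGo, if_neg h, pvSplitGo, if_neg h, ih]

theorem pvG_nil (w : List Char) :
    pvG w [] = if w ≠ [] then [String.mk w] else [] := by
  by_cases h : w = [] <;> simp [pvG, pvSplitGo, List.filter, h]

theorem pvG_delim {c : Char} (h : pvIsDelim c = true) (w X : List Char) :
    pvG w (c :: X) = (if w ≠ [] then [String.mk w] else []) ++ pvG [] X := by
  unfold pvG
  rw [pvSplitGo, if_pos h, pvSplitGo_acc]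
  by_cases hw : w = [] <;> simp [hw]

theorem pvG_nondelim {c : Char} (h : pvIsDelim c = false) (w X : List Char) :
    pvG w (c :: X) = pvG (w ++ [c]) X := by
  unfold pvG
  rw [pvSplitGo, if_neg (by simp [h])]

-- the main mutual invariant: outside a string A's machine computes pass 2 of B's
-- cleaned text; inside a string it computes pass 2 of the text after the literal.
theorem pvMain : ∀ n (l : List Char), l.length ≤ n →
    (∀ tokens cur, pvGoA l tokens cur false false = tokens ++ pvG cur (pvEraseStrings l)) ∧
    (∀ tokens, pvGoA l tokens [] true false = tokens ++ pvG [] (pvEraseStrings (pvSkipStr l))) := by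
  intro n
  induction n with
  | zero =>
      intro l hl
      have : l = [] := List.eq_nil_of_length_eq_zero (Nat.le_zero.mp hl)
      subst this
      constructor
      · intro tokens cur
        by_cases h : cur = [] <;>
          simp [pvGoA, pvEraseStrings, pvG_nil, h]
      · intro tokens
        simp [pvGoA, pvSkipStr, pvEraseStrings, pvG_nil]
  | succ n ih =>
      intro l hl
      match l with
      | [] => exact ih [] (by simp)
      | c :: rest =>
        have hrest : rest.length ≤ n := by simpa using Nat.lt_succ_iff.mp (Nat.lt_of_lt_of_le (by simp) hl)
        constructor
        · -- outside a string
          intro tokens cur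
          rw [pvGoA, if_neg (by simp)]
          by_cases hq : c = '"'
          · subst hq
            rw [if_neg (by simp), if_pos rfl]
            rw [pvEraseStrings, if_pos rfl, pvG_delim (by decide)]
            by_cases hc : cur = []
            · subst hc
              rw [if_neg (by simp)]
              simp only [Bool.not_false]
              rw [(ih rest hrest).2 tokens]
              simp
            · rw [if_pos ⟨hc, rfl⟩]
              simp only [Bool.not_false]
              rw [(ih rest hrest).2 (tokens ++ [String.mk cur])]
              simp [hc]
          · rw [if_neg (by simp), if_neg hq, if_neg (by simp)]
            rw [pvEraseStrings, if_neg hq]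
            by_cases hd : pvIsDelim c
            · rw [if_pos hd, pvG_delim hd]
              by_cases hc : cur = []
              · rw [if_neg (by simp [hc])]
                rw [(ih rest hrest).1 tokens cur]
                simp [hc]
              · rw [if_pos hc]
                rw [(ih rest hrest).1 (tokens ++ [String.mk cur]) []]
                simp [hc]
            · rw [if_neg hd, pvG_nondelim (by simpa using hd)]
              exact (ih rest hrest).1 tokens (cur ++ [c])
        · -- inside a string
          intro tokens
          rw [pvGoA, if_neg (by simp)]
          by_cases hb : c = '\\'
          · subst hb
            rw [if_pos ⟨rfl, rfl⟩]
            rw [pvSkipStr, if_pos rfl]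
            match rest, hrest with
            | [], _ =>
                simp [pvGoA, pvSkipStr, pvEraseStrings, pvG_nil]
            | x :: rest', hr =>
                rw [pvGoA, if_pos rfl]
                have hr' : rest'.length ≤ n := le_trans (by simp) hr
                simpa using (ih rest' hr').2 tokens
          · by_cases hq : c = '"'
            · subst hq
              rw [if_neg (by simp [hb]), if_pos rfl, if_neg (by simp)]
              rw [pvSkipStr, if_neg hb, if_pos rfl]
              simp only [Bool.not_true]
              exact (ih rest hrest).1 tokens []
            · rw [if_neg (by simp [hb]), if_neg hq, if_pos rfl]
              rw [pvSkipStr, if_neg hb, if_neg hq]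
              exact (ih rest hrest).2 tokens

-- ===== VERDICT (by name: the statement is the Claim_ definition above) =====
theorem extract_tokens_outside_strings_spec : Claim_equal_extract_tokens_outside_strings := by
  intro text _
  unfold Spec_extract_tokens_outside_strings extract_tokens_outside_strings extract_tokens_outside_strings_alt
  simpa [pvG] using (pvMain text.toList.length text.toList le_rfl).1 [] []
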